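-- pv_equiv track=rewrite | github.com/imontoyah/ST0245-002 | laboratorios/lab03/ejercicioEnLinea/TecladoRoto.py | teclado
-- ===== SOURCE A (Python) =====
-- from collections import deque
--
-- def teclado(string):
--     texto = deque()                                                                 #C1
--     acc = 0     #0 - agregar al final / 1 - agrgar al inicio                        #C2
--     aux = ''
--     stringFinal = ''                                                                #C3
--     for i in range (len(string)):                                                   #C3.0*n  - - > where n is the string´s length
--         if string[i] != '[' and string[i] != ']':                                   #C4
--            aux = aux + string[i]                                                    #C5
--         if string[i] == '[':                                                        #C6
--             if acc == 0:                                                            #C7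
--                 texto.append(aux)                                                   #C7.0
--                 aux = ''                                                            #C8
--             else:
--                 texto.insert(0,aux)                                                 #C9
--                 aux = ''                                                            #C10
--             acc = 1                                                                 #C11
--         if string[i] == ']':                                                        #C12
--             if acc == 1:                                                            #C13
--                 texto.insert(0,aux)                                                 #C15
--                 aux = ''                                                            #C16
--             acc = 0                                                                 #c17
--         if i == len(string)-1:                                                      #C18
--             if acc == 0:                                                            #C19
--                 texto.append(aux)                                                   #C19.0
--                 aux = ''                                                            #C20
--             else:
--                 texto.insert(0,aux)                                                 #C21
--                 aux = ''                                                            #C22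
--
--             for i in range(len(texto)):                                             #C23*m - - > where m is the List´s length
--                 stringFinal += texto.popleft()                                      #C23.0
--
--     return stringFinal                                                              #C24
-- ===== SOURCE B (Python) =====
-- def _cut(s):
--     i = 0
--     while i < len(s) and s[i] != '[' and s[i] != ']':
--         i += 1
--     return i
--
-- def teclado(string):
--     fronts = []
--     backs = []
--     front = False
--     s = string
--     while s:
--         i = _cut(s)
--         if front:
--             fronts.append(s[:i])
--         else:
--             backs.append(s[:i])
--         if i < len(s):
--             front = s[i] == '['
--         s = s[i + 1:]
--     return ''.join(reversed(fronts)) + ''.join(backs)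
-- ===== Notes on version B (the rewrite author's own statement) =====
-- stated objective: alternative
-- what changed: A runs a per-character state machine pushing characters into an aux buffer and flushing it into a deque (insert(0)/append) that is drained at the last index; B instead splits the string into bracket-delimited segments, classifies each whole segment into a fronts or backs list according to the current mode, and returns the join of the reversed fronts list followed by the join of the backs list.
import Mathlib
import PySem

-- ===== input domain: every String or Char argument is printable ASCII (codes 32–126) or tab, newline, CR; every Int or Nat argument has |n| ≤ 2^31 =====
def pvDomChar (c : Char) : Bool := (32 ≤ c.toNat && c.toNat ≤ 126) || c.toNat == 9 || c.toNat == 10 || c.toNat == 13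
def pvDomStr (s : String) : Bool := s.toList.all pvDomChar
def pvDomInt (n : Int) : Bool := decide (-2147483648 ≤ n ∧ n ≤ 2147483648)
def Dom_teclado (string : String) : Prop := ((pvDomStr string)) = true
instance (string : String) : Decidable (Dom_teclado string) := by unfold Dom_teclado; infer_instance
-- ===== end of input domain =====

-- B replaces A's per-character state machine over a deque (front inserts, back appends,
-- final drain loop) by splitting the string into bracket-delimited segments, classifying
-- each whole segment into a fronts/backs list, and returning join(reversed(fronts)) +
-- join(backs) (objective: alternative decomposition).

-- ===== PORT A =====
-- A's per-character body: the three sequential `if`s on string[i] (C4–C17),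
-- acting on the state (texto, acc, aux).
def brokenStep (texto : List String) (acc : Nat) (aux : String) (c : Char) :
    List String × Nat × String :=
  let aux := if c ≠ '[' ∧ c ≠ ']' then aux.push c else aux
  let t1 : List String × Nat × String :=
    if c = '[' then
      (if acc = 0 then (texto ++ [aux], 1, "") else (aux :: texto, 1, ""))
    else (texto, acc, aux)
  if c = ']' then
    (if t1.2.1 = 1 then (t1.2.2 :: t1.1, 0, "") else (t1.1, 0, t1.2.2))
  else t1

-- A's full loop body for index i: brokenStep, then the `i == len(string)-1` block
-- (final flush C18–C22 and the drain loop C23 accumulating into stringFinal).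
def fullStep (cs : List Char) (n : Nat) (st : List String × Nat × String × String)
    (i : Nat) : List String × Nat × String × String :=
  let c := cs.getD i ' '
  let s1 := brokenStep st.1 st.2.1 st.2.2.1 c
  if i = n - 1 then
    let t2 := if s1.2.1 = 0 then s1.1 ++ [s1.2.2] else s1.2.2 :: s1.1
    ([], s1.2.1, "", t2.foldl (· ++ ·) st.2.2.2)
  else (s1.1, s1.2.1, s1.2.2, st.2.2.2)

def teclado (string : String) : String :=
  let cs := string.toList
  let n := cs.length
  ((List.range n).foldl (fullStep cs n) ([], 0, "", "")).2.2.2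

-- ===== PORT B =====
-- B's helper _cut: index of the first '[' or ']' (length if none); the index
-- while-loop becomes the obvious structural recursion.
def cutRec : List Char → Nat
  | [] => 0
  | c :: t => if c = '[' ∨ c = ']' then 0 else cutRec t + 1

-- B's while loop: peel off the segment before the first bracket, classify it,
-- update the mode from the bracket, recurse on the rest; at the end
-- ''.join(reversed(fronts)) + ''.join(backs).
def altGo (fronts backs : List String) (front : Bool) (s : List Char) : String :=
  if hs : s = [] then String.join fronts.reverse ++ String.join backs
  else
    altGo (if front then fronts ++ [String.ofList (s.take (cutRec s))] else fronts)
          (if front then backs else backs ++ [String.ofList (s.take (cutRec s))])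
          (if cutRec s < s.length then decide (s.getD (cutRec s) ' ' = '[') else front)
          (s.drop (cutRec s + 1))
termination_by s.length
decreasing_by
  cases s with
  | nil => exact absurd rfl hs
  | cons a t => simp [List.length_drop]

def teclado_alt (string : String) : String := altGo [] [] false string.toList

-- ===== PRECONDITION & SPEC =====
def Spec_teclado (string : String) (out : String) : Prop := out = teclado_alt string
instance (string : String) (out : String) : Decidable (Spec_teclado string out) := by unfold Spec_teclado; infer_instance

-- ===== CLAIM (what is proved, stated in full; the proofs are below) =====
def Claim_equal_teclado : Prop := ∀ (string : String), Dom_teclado string → Spec_teclado string (teclado string)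

-- ===== LEMMAS AND PROOFS =====

-- intermediate model used only in the proof: A's deque loop reformulated as a
-- front/back string-pair state machine (fbStep), with finaliser fbFin
def fbStep (st : String × String × String × Bool) (c : Char) :
    String × String × String × Bool :=
  if c = '[' then
    (if st.2.2.2 then (st.1, st.2.1 ++ st.2.2.1, "", false)
     else (st.2.2.1 ++ st.1, st.2.1, "", false))
  else if c = ']' then
    (if st.2.2.2 then st else (st.2.2.1 ++ st.1, st.2.1, "", true))
  else (st.1, st.2.1, st.2.2.1.push c, st.2.2.2)

def fbFin (st : String × String × String × Bool) : String :=
  if st.2.2.2 then st.1 ++ (st.2.1 ++ st.2.2.1) else (st.2.2.1 ++ st.1) ++ st.2.1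

def fbRun (s : List Char) (st : String × String × String × Bool) : String :=
  fbFin (s.foldl fbStep st)

-- concatenation of the deque contents (A's drain loop with empty initial accumulator)
def J (l : List String) : String := l.foldl (· ++ ·) ""

theorem foldl_append_init (l : List String) (x : String) :
    l.foldl (· ++ ·) x = x ++ J l := by
  induction l generalizing x with
  | nil => simp [J]
  | cons a t ih =>
      simp only [List.foldl_cons, J]
      rw [ih (x ++ a), ih ("" ++ a), String.empty_append, String.append_assoc]

theorem J_cons (a : String) (l : List String) : J (a :: l) = a ++ J l := by
  simp only [J, List.foldl_cons]
  rw [foldl_append_init, String.empty_append]; rfl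

theorem J_concat (l : List String) (a : String) : J (l ++ [a]) = J l ++ a := by
  simp [J, List.foldl_append]

-- the invariant tying A's (texto, acc, aux) to the fb state (front, back, aux, home)
def InvAB (sa : List String × Nat × String) (sb : String × String × String × Bool) : Prop :=
  sa.2.2 = sb.2.2.1 ∧ sa.2.1 = (if sb.2.2.2 then 0 else 1) ∧ J sa.1 = sb.1 ++ sb.2.1

theorem rel_step (sa : List String × Nat × String) (sb : String × String × String × Bool)
    (h : InvAB sa sb) (c : Char) :
    InvAB (brokenStep sa.1 sa.2.1 sa.2.2 c) (fbStep sb c) := by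
  obtain ⟨h1, h2, h3⟩ := h
  by_cases hb : c = '['
  · subst hb
    cases hh : sb.2.2.2 <;>
      simp_all [InvAB, brokenStep, fbStep, J_cons, J_concat, String.append_assoc]
  · by_cases hc : c = ']'
    · subst hc
      cases hh : sb.2.2.2 <;>
        simp_all [InvAB, brokenStep, fbStep, J_cons, String.append_assoc]
    · cases hh : sb.2.2.2 <;>
        simp_all [InvAB, brokenStep, fbStep]

theorem rel_fold (l : List Char) (sa : List String × Nat × String)
    (sb : String × String × String × Bool) (h : InvAB sa sb) :
    InvAB (l.foldl (fun s c => brokenStep s.1 s.2.1 s.2.2 c) sa) (l.foldl fbStep sb) := by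
  induction l generalizing sa sb with
  | nil => exact h
  | cons a t ih => exact ih _ _ (rel_step sa sb h a)

-- A's fold over range m (m strictly before the last index) never triggers the
-- final-flush branch and is the prefix fold of brokenStep.
theorem fold_prefix (cs : List Char) (m : Nat) (hm : m < cs.length)
    (st : List String × Nat × String × String) :
    (List.range m).foldl (fullStep cs cs.length) st =
      (((cs.take m).foldl (fun s c => brokenStep s.1 s.2.1 s.2.2 c) (st.1, st.2.1, st.2.2.1)).1,
       ((cs.take m).foldl (fun s c => brokenStep s.1 s.2.1 s.2.2 c) (st.1, st.2.1, st.2.2.1)).2.1,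
       ((cs.take m).foldl (fun s c => brokenStep s.1 s.2.1 s.2.2 c) (st.1, st.2.1, st.2.2.1)).2.2,
       st.2.2.2) := by
  induction m with
  | zero => simp
  | succ k ih =>
      have hk : k < cs.length := Nat.lt_of_succ_lt hm
      have hne : k ≠ cs.length - 1 := by omega
      have hget : cs[k]? = some cs[k] := List.getElem?_eq_getElem hk
      rw [List.range_succ, List.foldl_append, ih hk]
      have htake : cs.take (k + 1) = cs.take k ++ [cs[k]] := by
        rw [List.take_add_one, hget]; rfl
      rw [htake, List.foldl_append]
      simp only [List.foldl_cons, List.foldl_nil, fullStep, if_neg hne]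
      have : cs.getD k ' ' = cs[k] := by simp [List.getD, hget]
      rw [this]

-- A equals the fb state machine
theorem teclado_eq_fb (string : String) :
    teclado string = fbRun string.toList ("", "", "", true) := by
  rcases List.eq_nil_or_concat string.toList with hcs | ⟨l, a, hcs⟩
  · simp [teclado, fbRun, fbFin, hcs]
  · rw [List.concat_eq_append] at hcs
    have hlen : string.toList.length = l.length + 1 := by rw [hcs]; simp
    have hrel0 : InvAB ([], 0, "") ("", "", "", true) := ⟨rfl, rfl, rfl⟩
    have hrel := rel_fold (l ++ [a]) _ _ hrel0
    simp only [List.foldl_append, List.foldl_cons, List.foldl_nil] at hrel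
    set sa := List.foldl (fun s c => brokenStep s.1 s.2.1 s.2.2 c) ([], 0, "") l with hsa
    set sb := List.foldl fbStep ("", "", "", true) l with hsb
    obtain ⟨haux, hacc, hJ⟩ := rel_fold l _ _ hrel0
    have hm : l.length < string.toList.length := by omega
    have hrange : List.range string.toList.length = List.range l.length ++ [l.length] := by
      rw [hlen, List.range_succ]
    have hA : teclado string = J (if (brokenStep sa.1 sa.2.1 sa.2.2 a).2.1 = 0
        then (brokenStep sa.1 sa.2.1 sa.2.2 a).1 ++ [(brokenStep sa.1 sa.2.1 sa.2.2 a).2.2]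
        else (brokenStep sa.1 sa.2.1 sa.2.2 a).2.2 :: (brokenStep sa.1 sa.2.1 sa.2.2 a).1) := by
      have htake : string.toList.take l.length = l := by rw [hcs]; simp
      have hgetl : string.toList.getD l.length ' ' = a := by rw [hcs]; simp [List.getD]
      simp only [teclado, hrange, List.foldl_append, List.foldl_cons, List.foldl_nil]
      rw [fold_prefix string.toList l.length hm]
      rw [htake, ← hsa]
      simp only [fullStep]
      rw [hgetl]
      simp [hlen, J]
    have hB : fbRun string.toList ("", "", "", true) = (if (fbStep sb a).2.2.2 then
          (fbStep sb a).1 ++ ((fbStep sb a).2.1 ++ (fbStep sb a).2.2.1)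
        else ((fbStep sb a).2.2.1 ++ (fbStep sb a).1) ++ (fbStep sb a).2.1) := by
      simp only [fbRun, fbFin, hcs, List.foldl_append, List.foldl_cons, List.foldl_nil, ← hsb]
    have hrel' := rel_step sa sb ⟨haux, hacc, hJ⟩ a
    obtain ⟨haux', hacc', hJ'⟩ := hrel'
    rw [hA, hB]
    cases hh : (fbStep sb a).2.2.2
    · rw [hh] at hacc'
      simp only [Bool.false_eq_true, if_false] at hacc' ⊢
      rw [if_neg (by omega : ¬ (brokenStep sa.1 sa.2.1 sa.2.2 a).2.1 = 0)]
      rw [J_cons, hJ', haux', String.append_assoc]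
    · rw [hh] at hacc'
      simp at hacc'
      simp only [if_pos trivial]
      rw [if_pos hacc']
      rw [J_concat, hJ', haux', String.append_assoc]

-- ---- B side: altGo equals the fb state machine ----

theorem cutRec_le (s : List Char) : cutRec s ≤ s.length := by
  induction s with
  | nil => simp [cutRec]
  | cons c t ih => by_cases h : c = '[' ∨ c = ']' <;> simp [cutRec, h] <;> omega

theorem take_cut_nobr (s : List Char) :
    ∀ c ∈ s.take (cutRec s), ¬(c = '[' ∨ c = ']') := by
  induction s with
  | nil => simp
  | cons c t ih =>
      by_cases h : c = '[' ∨ c = ']'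
      · simp [cutRec, h]
      · intro x hx
        rw [cutRec, if_neg h, List.take_succ_cons] at hx
        rcases List.mem_cons.mp hx with hx | hx
        · subst hx; exact h
        · exact ih x hx

theorem cut_lt_bracket (s : List Char) (h : cutRec s < s.length) :
    s.getD (cutRec s) ' ' = '[' ∨ s.getD (cutRec s) ' ' = ']' := by
  induction s with
  | nil => simp [cutRec] at h
  | cons c t ih =>
      by_cases hb : c = '[' ∨ c = ']'
      · simpa [cutRec, hb, List.getD] using hb
      · rw [cutRec, if_neg hb] at h ⊢
        simpa [List.getD] using ih (by simpa using Nat.lt_of_succ_lt_succ h)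

theorem pushAll_eq (l : List Char) (a : String) :
    l.foldl (fun a c => a.push c) a = a ++ String.ofList l := by
  induction l generalizing a with
  | nil =>
      apply String.ext
      simp
  | cons c t ih =>
      simp only [List.foldl_cons, ih]
      apply String.ext
      simp

theorem fb_fold_nobr (l : List Char) (h : ∀ c ∈ l, ¬(c = '[' ∨ c = ']'))
    (F B aux : String) (home : Bool) :
    l.foldl fbStep (F, B, aux, home) =
      (F, B, l.foldl (fun a c => a.push c) aux, home) := by
  induction l generalizing aux with
  | nil => rfl
  | cons c t ih =>
      have hc := h c (by simp)
      simp only [List.foldl_cons, fbStep, if_neg (fun hh => hc (Or.inl hh)),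
        if_neg (fun hh => hc (Or.inr hh))]
      exact ih (fun x hx => h x (by simp [hx])) _

-- in home mode the pending aux may be pre-flushed to the back
theorem fbRun_flush_back (cs : List Char) :
    ∀ F B aux : String, fbRun cs (F, B, aux, true) = fbRun cs (F, B ++ aux, "", true) := by
  induction cs with
  | nil =>
      intro F B aux
      simp [fbRun, fbFin, String.append_empty]
  | cons c t ih =>
      intro F B aux
      by_cases hb : c = '['
      · subst hb
        simp [fbRun, fbStep, String.append_empty]
      · by_cases hc : c = ']'
        · subst hc
          simpa [fbRun, fbStep] using ih F B aux
        · simp only [fbRun, List.foldl_cons, fbStep, if_neg hb, if_neg hc]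
          have h1 := ih F B (aux.push c)
          have h2 := ih F (B ++ aux) ("".push c)
          simp only [fbRun] at h1 h2
          rw [h1, h2]
          have : B ++ aux.push c = (B ++ aux) ++ "".push c := by
            apply String.ext
            simp
          rw [this]

theorem join_eq_J (l : List String) : String.join l = J l := rfl

theorem join_cons (a : String) (l : List String) :
    String.join (a :: l) = a ++ String.join l := by
  simp [join_eq_J, J_cons]

theorem join_concat (l : List String) (a : String) :
    String.join (l ++ [a]) = String.join l ++ a := by
  simp [join_eq_J, J_concat]

-- main bridge: B's segment recursion computes the fb state machine's result
theorem altGo_eq_fbRun (n : Nat) :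
    ∀ s : List Char, s.length ≤ n → ∀ (fronts backs : List String) (front : Bool),
      altGo fronts backs front s =
        fbRun s (String.join fronts.reverse, String.join backs, "", !front) := by
  induction n with
  | zero =>
      intro s hs fronts backs front
      have : s = [] := by cases s <;> simp_all
      subst this
      cases front <;> simp [altGo, fbRun, fbFin, String.append_empty]
  | succ n ih =>
      intro s hs fronts backs front
      by_cases hnil : s = []
      · subst hnil
        cases front <;> simp [altGo, fbRun, fbFin, String.append_empty]
      · rw [altGo, dif_neg hnil]
        set i := cutRec s with hi
        have hile : i ≤ s.length := cutRec_le s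
        set seg := String.ofList (s.take i) with hseg
        -- fold over the bracket-free prefix
        have hpre : (s.take i).foldl fbStep
            (String.join fronts.reverse, String.join backs, "", !front) =
            (String.join fronts.reverse, String.join backs, seg, !front) := by
          rw [fb_fold_nobr _ (take_cut_nobr s), pushAll_eq, hseg, String.empty_append]
        have hsplit : s = s.take i ++ s.drop i := (List.take_append_drop i s).symm
        by_cases hlt : i < s.length
        · -- a bracket sits at position i
          have hdrop : s.drop i = s.getD i ' ' :: s.drop (i + 1) := by
            rw [List.getD_eq_getElem s ' ' hlt]
            exact List.drop_eq_getElem_cons hlt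
          have hbr := cut_lt_bracket s hlt
          have htail : (s.drop (i + 1)).length ≤ n := by
            have h1 : (s.drop (i + 1)).length = s.length - (i + 1) := by simp
            have h2 : 0 < s.length := List.length_pos_of_ne_nil hnil
            omega
          have hstep : fbRun s (String.join fronts.reverse, String.join backs, "", !front) =
              fbRun (s.drop (i + 1)) (fbStep (String.join fronts.reverse, String.join backs, seg, !front) (s.getD i ' ')) := by
            conv_lhs => rw [hsplit]
            rw [fbRun, List.foldl_append, hpre, hdrop, List.foldl_cons]
            rfl
          rw [hstep]
          rcases hbr with hbr | hbr <;> rw [hbr] <;> cases hf : front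
          · -- '[' , front = false (home): seg to backs, go front
            simp only [if_neg (Bool.false_ne_true), if_pos hlt]
            rw [ih _ htail]
            simp [fbStep, join_concat]
          · -- '[' , front = true: seg to fronts
            simp only [if_pos hlt]
            rw [ih _ htail]
            simp [fbStep, join_cons]
          · -- ']' , front = false (home): fb keeps aux; pre-flush lemma
            simp only [if_neg (Bool.false_ne_true), if_pos hlt]
            rw [ih _ htail]
            have : fbStep (String.join fronts.reverse, String.join backs, seg, !false) ']' =
                (String.join fronts.reverse, String.join backs, seg, true) := by
              simp [fbStep]
            rw [this]
            rw [fbRun_flush_back]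
            simp [join_concat]
          · -- ']' , front = true: flush to front
            simp only [if_pos hlt]
            rw [ih _ htail]
            simp [fbStep, join_cons]
        · -- no bracket: i = s.length, segment is the whole rest
          have hieq : i = s.length := le_antisymm hile (le_of_not_gt hlt)
          have hdropnil : s.drop (i + 1) = [] := by
            apply List.drop_eq_nil_of_le; omega
          rw [if_neg hlt, hdropnil]
          cases hf : front
          · rw [hf] at hpre
            simp only [Bool.false_eq_true, if_false]
            rw [altGo]
            conv_rhs => rw [hsplit]
            rw [fbRun, List.foldl_append, hpre]
            simp [hieq, fbFin, join_concat]
          · rw [hf] at hpre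
            rw [altGo]
            conv_rhs => rw [hsplit]
            rw [fbRun, List.foldl_append, hpre]
            simp [hieq, fbFin, join_cons, String.append_assoc]

theorem teclado_eq_alt (string : String) : teclado string = teclado_alt string := by
  rw [teclado_eq_fb, teclado_alt,
      altGo_eq_fbRun string.toList.length string.toList le_rfl [] [] false]
  rfl

-- ===== VERDICT (by name: the statement is the Claim_ definition above) =====
theorem teclado_spec : Claim_equal_teclado := by
  intro s _
  exact teclado_eq_alt s
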